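-- pv_equiv track=rewrite | github.com/krisshsaahi49/statistical_machine_translation_english_to_telugu | SMT_PhraseBased.py | train_distortion_table
-- ===== SOURCE A (Python) =====
-- def train_distortion_table(aligned_sentences):
--     """
--     Trains a distortion table using aligned sentences.
--     Args:
--         aligned_sentences (list): List of aligned sentences in the format [(english_sent, telugu_sent), ...]
--     Returns:
--         distortion_table (dict): Dictionary representing the distortion table
--     """
--     distortion_table = {}
--     for english_sent, telugu_sent in aligned_sentences:
--         english_words = english_sent.split()
--         telugu_words = telugu_sent.split()
--         for i in range(len(english_words)):
--             english_word = english_words[i]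
--             telugu_word = telugu_words[i]
--             if english_word not in distortion_table:
--                 distortion_table[english_word] = {}
--             if telugu_word not in distortion_table[english_word]:
--                 distortion_table[english_word][telugu_word] = 0
--             distortion_table[english_word][telugu_word] += 1
--     return distortion_table
-- ===== SOURCE B (Python) =====
-- def train_distortion_table(aligned_sentences):
--     # Pass 1: flatten into the ordered list of (english, telugu) word pairs
--     # (indexing kept so an IndexError still fires when the telugu side is shorter).
--     pairs = []
--     for english_sent, telugu_sent in aligned_sentences:
--         english_words = english_sent.split()
--         telugu_words = telugu_sent.split()
--         for i in range(len(english_words)):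
--             pairs.append((english_words[i], telugu_words[i]))
--     # Pass 2: group-by-count, no running counters: distinct english words in
--     # first-occurrence order; for each, its distinct telugu partners in order,
--     # each count computed directly with pairs.count.
--     return {
--         e: {t: pairs.count((e, t))
--             for t in dict.fromkeys(t2 for e2, t2 in pairs if e2 == e)}
--         for e in dict.fromkeys(e2 for e2, _ in pairs)
--     }
-- ===== Notes on version B (the rewrite author's own statement) =====
-- stated objective: alternative
-- what changed: Replaces A's single pass of incremental nested-dict counter updates by a flatten-then-group-by-count scheme: first build the plain list of (english, telugu) word pairs, then assemble the table with ordered dedup (dict.fromkeys) for the keys and a direct pairs.count((e, t)) for each count - no running counters at all.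
import Mathlib
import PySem

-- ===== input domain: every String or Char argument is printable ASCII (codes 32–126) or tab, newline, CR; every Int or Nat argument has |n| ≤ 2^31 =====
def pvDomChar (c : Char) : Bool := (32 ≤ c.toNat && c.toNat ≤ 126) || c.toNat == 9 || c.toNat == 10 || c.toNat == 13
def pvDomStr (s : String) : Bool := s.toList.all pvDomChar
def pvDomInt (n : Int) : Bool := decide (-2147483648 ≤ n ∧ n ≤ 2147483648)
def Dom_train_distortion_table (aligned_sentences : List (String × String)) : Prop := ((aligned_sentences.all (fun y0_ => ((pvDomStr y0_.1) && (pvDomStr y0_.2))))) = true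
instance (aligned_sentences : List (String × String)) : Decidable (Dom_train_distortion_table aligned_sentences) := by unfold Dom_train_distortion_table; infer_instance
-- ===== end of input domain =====

-- B replaces A's single pass of incremental nested-dict counter updates by flatten-then-group-by-count:
-- build the flat list of (english, telugu) word pairs, then assemble the table from ordered dedups of
-- the keys with each count computed directly by pairs.count (objective: alternative, no running counters).

-- ===== PORT A =====
-- A-side helper: the body of A's inner loop for one word pair (dict updates of A, step for step).
def pvStepA (d : PySem.Dict String (PySem.Dict String Int)) (e t : String) :
    PySem.Dict String (PySem.Dict String Int) :=
  let d1 := if d.contains e then d else d.insert e PySem.Dict.empty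
  let inner := d1.getD e PySem.Dict.empty
  let inner1 := if inner.contains t then inner else inner.insert t 0
  d1.insert e (inner1.insert t (inner1.getD t 0 + 1))

def train_distortion_table (aligned_sentences : List (String × String)) :
    List (String × List (String × Int)) :=
  ((aligned_sentences.foldl (fun d s =>
      let ew := PySem.Str.split₀ s.1
      let tw := PySem.Str.split₀ s.2
      (PySem.List.pyRange 0 ew.length 1).foldl (fun d i =>
        match PySem.List.pyGet? ew i, PySem.List.pyGet? tw i with
        | some e, some t => pvStepA d e t
        | _, _ => d) d) PySem.Dict.empty).items).map (fun q => (q.1, q.2.items))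

-- ===== PORT B =====
def train_distortion_table_alt (aligned_sentences : List (String × String)) :
    List (String × List (String × Int)) :=
  -- pass 1: flatten into the ordered list of (english, telugu) word pairs
  let pairs := aligned_sentences.foldl (fun acc s =>
      let ew := PySem.Str.split₀ s.1
      let tw := PySem.Str.split₀ s.2
      (PySem.List.pyRange 0 ew.length 1).foldl (fun acc i =>
        match PySem.List.pyGet? ew i with
        | none => acc
        | some e =>
          match PySem.List.pyGet? tw i with
          | none => acc
          | some t => acc ++ [(e, t)]) acc) []
  -- pass 2: group-by-count via ordered dedup (dict.fromkeys) and pairs.count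
  (PySem.List.dedup (pairs.map (fun q => q.1))).map (fun e =>
    (e, (PySem.List.dedup ((pairs.filter (fun q => q.1 == e)).map (fun q => q.2))).map
      (fun t => (t, (pairs.count (e, t) : Int)))))

-- ===== PRECONDITION & SPEC =====
-- Pre_ excludes exactly the inputs on which Python A raises IndexError (a sentence whose english
-- side has more whitespace-separated words than its telugu side); B raises there as well.
def Pre_train_distortion_table (aligned_sentences : List (String × String)) : Prop :=
  ∀ s ∈ aligned_sentences, (PySem.Str.split₀ s.1).length ≤ (PySem.Str.split₀ s.2).length

instance (aligned_sentences : List (String × String)) : Decidable (Pre_train_distortion_table aligned_sentences) := by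
  unfold Pre_train_distortion_table; infer_instance

def pvWitness_train_distortion_table : (List (String × String)) :=
  [("the cat", "x y"), ("a", "b c")]

def Spec_train_distortion_table (aligned_sentences : List (String × String))
    (out : List (String × List (String × Int))) : Prop :=
  out = train_distortion_table_alt aligned_sentences

instance (aligned_sentences : List (String × String)) (out : List (String × List (String × Int))) : Decidable (Spec_train_distortion_table aligned_sentences out) := by
  unfold Spec_train_distortion_table; infer_instance

-- ===== CLAIM (what is proved, stated in full; the proofs are below) =====
def Claim_equal_train_distortion_table : Prop :=
  ∀ (aligned_sentences : List (String × String)),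
    Dom_train_distortion_table aligned_sentences →
    Pre_train_distortion_table aligned_sentences →
    Spec_train_distortion_table aligned_sentences (train_distortion_table aligned_sentences)

-- ===== LEMMAS AND PROOFS =====

-- The (english_words[i], telugu_words[i]) pair, none on IndexError.
def pvPair (ew tw : List String) (i : Int) : Option (String × String) :=
  match PySem.List.pyGet? ew i with
  | none => none
  | some e =>
    match PySem.List.pyGet? tw i with
    | none => none
    | some t => some (e, t)

-- The word pairs a sentence pair contributes (indices where both lookups succeed).
def pvPairsOf (s : String × String) : List (String × String) :=
  (PySem.List.pyRange 0 (PySem.Str.split₀ s.1).length 1).filterMap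
    (pvPair (PySem.Str.split₀ s.1) (PySem.Str.split₀ s.2))

-- Canonical description of the nested table built from a flat pair list P.
def pvInner (P : List (String × String)) (e : String) : PySem.Dict String Int :=
  PySem.Dict.mk (((PySem.Set.ofList P).filter (fun q => q.1 == e)).map
    (fun q => (q.2, (P.count q : Int))))

def pvC (P : List (String × String)) : PySem.Dict String (PySem.Dict String Int) :=
  PySem.Dict.mk ((PySem.Set.ofList (P.map (·.1))).map (fun e => (e, pvInner P e)))

-- generic facts about dictionaries of the shape `mk (L.map (fun q => (k q, g q)))`
lemma pvMk_contains_iff {κ ν γ : Type} [BEq κ] [LawfulBEq κ] (L : List γ) (k : γ → κ)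
    (g : γ → ν) (x : κ) :
    (PySem.Dict.mk (L.map (fun q => (k q, g q)))).contains x = true ↔ x ∈ L.map k := by
  simp only [PySem.Dict.contains_mk, List.any_map, List.any_eq_true, Function.comp,
    beq_iff_eq, List.mem_map]

lemma pvMk_getD {κ ν γ : Type} [BEq κ] [LawfulBEq κ] (L : List γ) (k : γ → κ) (g : γ → ν)
    (hnd : (L.map k).Nodup) {q0 : γ} (hq : q0 ∈ L) (d0 : ν) :
    (PySem.Dict.mk (L.map (fun q => (k q, g q)))).getD (k q0) d0 = g q0 := by
  apply PySem.Dict.getD_of_mem_items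
  · exact List.mem_map_of_mem hq
  · simpa [PySem.Dict.keys_mk, List.map_map, Function.comp] using hnd

lemma pvMk_insert_of_mem {κ ν γ : Type} [BEq κ] [LawfulBEq κ] (L : List γ) (k : γ → κ)
    (g : γ → ν) {q0 : γ} (hq : q0 ∈ L) (v : ν) :
    (PySem.Dict.mk (L.map (fun q => (k q, g q)))).insert (k q0) v
      = PySem.Dict.mk (L.map (fun q => (k q, if k q == k q0 then v else g q))) := by
  apply PySem.Dict.ext
  rw [PySem.Dict.items_insert_of_contains _ _ ((pvMk_contains_iff L k g (k q0)).mpr (List.mem_map_of_mem hq))]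
  simp only [List.map_map]
  apply List.map_congr_left
  intro q _
  by_cases h : k q = k q0 <;> simp [Function.comp, h]

lemma pvMk_insert_of_not_mem {κ ν γ : Type} [BEq κ] [LawfulBEq κ] (L : List γ) (k : γ → κ)
    (g : γ → ν) {x : κ} (hx : x ∉ L.map k) (v : ν) :
    (PySem.Dict.mk (L.map (fun q => (k q, g q)))).insert x v
      = PySem.Dict.mk (L.map (fun q => (k q, g q)) ++ [(x, v)]) := by
  apply PySem.Dict.ext
  rw [PySem.Dict.items_insert_of_not_contains]
  rw [Bool.eq_false_iff]
  intro hc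
  exact hx ((pvMk_contains_iff L k g x).mp hc)

lemma pv_ofList_concat {α : Type} [BEq α] (xs : List α) (x : α) :
    PySem.Set.ofList (xs ++ [x]) = (PySem.Set.ofList xs).add x := by
  rw [PySem.Set.ofList_append, PySem.Set.update_cons, PySem.Set.update_nil]

-- inner key list facts
lemma pv_inner_keys_nodup (P : List (String × String)) (e : String) :
    ((((PySem.Set.ofList P).filter (fun q => q.1 == e))).map (fun q => q.2)).Nodup := by
  apply List.Nodup.map_on
  · intro x hx y hy hxy
    have hx' := (List.mem_filter.mp hx).2
    have hy' := (List.mem_filter.mp hy).2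
    cases x; cases y; simp_all
  · exact List.Nodup.filter _ (PySem.Set.nodup_ofList P)

lemma pv_mem_inner_keys (P : List (String × String)) (e t : String) :
    t ∈ ((PySem.Set.ofList P).filter (fun q => q.1 == e)).map (fun q => q.2) ↔ (e, t) ∈ P := by
  simp only [List.mem_map, List.mem_filter, PySem.Set.mem_ofList, beq_iff_eq]
  constructor
  · rintro ⟨⟨a, b⟩, ⟨hm, h1⟩, h2⟩
    simp only at h1 h2; subst h1; subst h2; exact hm
  · intro h; exact ⟨(e, t), ⟨h, rfl⟩, rfl⟩

-- loop-shape reduction: a fold guarded by the two option lookups is a fold over filterMap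
lemma pv_foldl_pairsA {α : Type} (ew tw : List String) (F : α → String → String → α)
    (l : List Int) (a : α) :
    l.foldl (fun a i =>
      match PySem.List.pyGet? ew i, PySem.List.pyGet? tw i with
      | some e, some t => F a e t
      | _, _ => a) a
    = (l.filterMap (pvPair ew tw)).foldl (fun a p => F a p.1 p.2) a := by
  induction l generalizing a with
  | nil => rfl
  | cons i l ih =>
    cases hew : PySem.List.pyGet? ew i <;> cases htw : PySem.List.pyGet? tw i <;>
      simp [pvPair, hew, htw, ih]

-- the step of A applied to the canonical table extends the flat pair list
lemma pv_stepA_C (P : List (String × String)) (e t : String) :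
    pvStepA (pvC P) e t = pvC (P ++ [(e, t)]) := by
  have hcount : ∀ q : String × String,
      ((P ++ [(e, t)]).count q : Int) = (P.count q : Int) + (if (e, t) = q then 1 else 0) := by
    intro q
    rw [List.count_append, List.count_singleton]
    by_cases h : (e, t) = q <;> simp [h]
  simp only [pvStepA]
  by_cases hE : e ∈ P.map (·.1)
  · -- the english word is already an outer key
    have hcont : (pvC P).contains e = true := by
      unfold pvC
      exact (pvMk_contains_iff _ (fun a => a) (fun e' => pvInner P e') e).mpr
        (by simp [List.map_id', PySem.Set.mem_ofList, hE])
    rw [if_pos hcont]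
    have hgetD : (pvC P).getD e PySem.Dict.empty = pvInner P e := by
      unfold pvC
      exact pvMk_getD _ (fun a => a) (fun e' => pvInner P e')
        (by simp only [List.map_id']; exact PySem.Set.nodup_ofList (P.map (·.1)))
        ((PySem.Set.mem_ofList (P.map (·.1)) e).mpr hE) PySem.Dict.empty
    rw [hgetD]
    have hkeys : PySem.Set.ofList ((P ++ [(e, t)]).map (·.1))
        = PySem.Set.ofList (P.map (·.1)) := by
      rw [List.map_append, List.map_cons, List.map_nil, pv_ofList_concat]
      simp [PySem.Set.add, PySem.Set.mem_ofList, hE]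
    by_cases hP : (e, t) ∈ P
    · -- the pair itself was seen before: in-place bump at both levels
      have hq0 : ((e, t) : String × String)
          ∈ (PySem.Set.ofList P).filter (fun q => q.1 == e) :=
        List.mem_filter.mpr ⟨(PySem.Set.mem_ofList P _).mpr hP, by simp⟩
      have hicont : (pvInner P e).contains t = true := by
        unfold pvInner
        exact (pvMk_contains_iff ((PySem.Set.ofList P).filter (fun q => q.1 == e))
          (fun q : String × String => q.2)
          (fun q : String × String => (P.count q : Int)) t).mpr
          ((pv_mem_inner_keys P e t).mpr hP)
      rw [if_pos hicont]
      have hgetT : (pvInner P e).getD t 0 = (P.count (e, t) : Int) := by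
        unfold pvInner
        exact pvMk_getD ((PySem.Set.ofList P).filter (fun q => q.1 == e))
          (fun q : String × String => q.2)
          (fun q : String × String => (P.count q : Int))
          (pv_inner_keys_nodup P e) hq0 0
      rw [hgetT]
      have hinsT : (pvInner P e).insert t ((P.count (e, t) : Int) + 1)
          = PySem.Dict.mk (((PySem.Set.ofList P).filter (fun q => q.1 == e)).map
              (fun q => (q.2, if q.2 == t then (P.count (e, t) : Int) + 1
                else (P.count q : Int)))) := by
        unfold pvInner
        exact pvMk_insert_of_mem ((PySem.Set.ofList P).filter (fun q => q.1 == e))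
          (fun q : String × String => q.2)
          (fun q : String × String => (P.count q : Int)) hq0 ((P.count (e, t) : Int) + 1)
      rw [hinsT]
      have houter : (pvC P).insert e (PySem.Dict.mk
            (((PySem.Set.ofList P).filter (fun q => q.1 == e)).map
              (fun q => (q.2, if q.2 == t then (P.count (e, t) : Int) + 1
                else (P.count q : Int)))))
          = PySem.Dict.mk ((PySem.Set.ofList (P.map (·.1))).map (fun e' =>
              (e', if e' == e then PySem.Dict.mk
                (((PySem.Set.ofList P).filter (fun q => q.1 == e)).map
                  (fun q => (q.2, if q.2 == t then (P.count (e, t) : Int) + 1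
                    else (P.count q : Int))))
                else pvInner P e'))) := by
        unfold pvC
        exact pvMk_insert_of_mem (PySem.Set.ofList (P.map (·.1))) (fun a => a)
          (fun e' => pvInner P e') ((PySem.Set.mem_ofList (P.map (·.1)) e).mpr hE) _
      rw [houter]
      unfold pvC
      apply PySem.Dict.ext
      simp only
      rw [hkeys]
      have hS : PySem.Set.ofList (P ++ [(e, t)]) = PySem.Set.ofList P := by
        rw [pv_ofList_concat]
        simp [PySem.Set.add, PySem.Set.mem_ofList, hP]
      apply List.map_congr_left
      intro e' he'
      by_cases h' : e' = e
      · subst h'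
        rw [if_pos (by simp : ((e' : String) == e') = true)]
        congr 1
        unfold pvInner
        apply PySem.Dict.ext
        simp only
        rw [hS]
        apply List.map_congr_left
        intro q hq
        rcases List.mem_filter.mp hq with ⟨hqS, hq1⟩
        have hq1' : q.1 = e' := beq_iff_eq.mp hq1
        by_cases hqt : q.2 = t
        · have hqp : q = (e', t) := Prod.ext hq1' hqt
          subst hqp
          rw [hcount]
          simp
        · have hqp : ¬ ((e', t) = q) := by
            intro hh; rw [← hh] at hqt; exact hqt rfl
          rw [hcount]
          simp [hqt, hqp]
      · rw [if_neg (by simp [h'] : ¬ ((e' == e) = true))]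
        congr 1
        unfold pvInner
        apply PySem.Dict.ext
        simp only
        rw [hS]
        apply List.map_congr_left
        intro q hq
        rcases List.mem_filter.mp hq with ⟨hqS, hq1⟩
        have hq1' : q.1 = e' := beq_iff_eq.mp hq1
        have hqp : ¬ ((e, t) = q) := by
          intro hh; rw [← hh] at hq1'; exact h' hq1'.symm
        rw [hcount]
        simp [hqp]
    · -- known english word, fresh telugu word: append to the inner dict
      have hicont : ¬ ((pvInner P e).contains t = true) := by
        unfold pvInner
        rw [pvMk_contains_iff ((PySem.Set.ofList P).filter (fun q => q.1 == e))
          (fun q : String × String => q.2)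
          (fun q : String × String => (P.count q : Int)) t]
        intro hmem
        exact hP ((pv_mem_inner_keys P e t).mp hmem)
      rw [if_neg hicont]
      rw [PySem.Dict.getD_insert_self, PySem.Dict.insert_insert_self]
      have hx : t ∉ ((PySem.Set.ofList P).filter (fun q => q.1 == e)).map
          (fun q : String × String => q.2) := by
        intro hmem
        exact hP ((pv_mem_inner_keys P e t).mp hmem)
      have hinsT : (pvInner P e).insert t ((0 : Int) + 1)
          = PySem.Dict.mk ((((PySem.Set.ofList P).filter (fun q => q.1 == e)).map
              (fun q => (q.2, (P.count q : Int)))) ++ [(t, (0 : Int) + 1)]) := by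
        unfold pvInner
        exact pvMk_insert_of_not_mem ((PySem.Set.ofList P).filter (fun q => q.1 == e))
          (fun q : String × String => q.2)
          (fun q : String × String => (P.count q : Int)) hx ((0 : Int) + 1)
      rw [hinsT]
      have houter : (pvC P).insert e (PySem.Dict.mk
            ((((PySem.Set.ofList P).filter (fun q => q.1 == e)).map
              (fun q => (q.2, (P.count q : Int)))) ++ [(t, (0 : Int) + 1)]))
          = PySem.Dict.mk ((PySem.Set.ofList (P.map (·.1))).map (fun e' =>
              (e', if e' == e then PySem.Dict.mk
                ((((PySem.Set.ofList P).filter (fun q => q.1 == e)).map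
                  (fun q => (q.2, (P.count q : Int)))) ++ [(t, (0 : Int) + 1)])
                else pvInner P e'))) := by
        unfold pvC
        exact pvMk_insert_of_mem (PySem.Set.ofList (P.map (·.1))) (fun a => a)
          (fun e' => pvInner P e') ((PySem.Set.mem_ofList (P.map (·.1)) e).mpr hE) _
      rw [houter]
      unfold pvC
      apply PySem.Dict.ext
      simp only
      rw [hkeys]
      have hpS : ((e, t) : String × String) ∉ PySem.Set.ofList P := by
        rw [PySem.Set.mem_ofList]; exact hP
      have hS : PySem.Set.ofList (P ++ [(e, t)]) = PySem.Set.ofList P ++ [(e, t)] := by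
        rw [pv_ofList_concat]
        simp [PySem.Set.add, PySem.Set.mem_ofList, hP]
      apply List.map_congr_left
      intro e' he'
      by_cases h' : e' = e
      · subst h'
        rw [if_pos (by simp : ((e' : String) == e') = true)]
        congr 1
        unfold pvInner
        apply PySem.Dict.ext
        simp only
        rw [hS, List.filter_append, List.map_append]
        congr 1
        · apply List.map_congr_left
          intro q hq
          rcases List.mem_filter.mp hq with ⟨hqS, hq1⟩
          have hqp : ¬ ((e', t) = q) := by
            intro hh; rw [← hh] at hqS; exact hpS hqS
          rw [hcount]
          simp [hqp]
        · simp [List.count_eq_zero.mpr hP]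
      · rw [if_neg (by simp [h'] : ¬ ((e' == e) = true))]
        congr 1
        unfold pvInner
        apply PySem.Dict.ext
        simp only
        rw [hS, List.filter_append]
        have hone : ([((e, t))] : List (String × String)).filter (fun q => q.1 == e') = [] := by
          simp [Ne.symm h']
        rw [hone, List.append_nil]
        apply List.map_congr_left
        intro q hq
        rcases List.mem_filter.mp hq with ⟨hqS, hq1⟩
        have hq1' : q.1 = e' := beq_iff_eq.mp hq1
        have hqp : ¬ ((e, t) = q) := by
          intro hh; rw [← hh] at hq1'; exact h' hq1'.symm
        rw [hcount]
        simp [hqp]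
  · -- fresh english word: append a new singleton inner dict
    have hc' : ¬ ((pvC P).contains e = true) := by
      unfold pvC
      rw [pvMk_contains_iff _ (fun a => a) (fun e' => pvInner P e') e]
      simp only [List.map_id']
      rw [PySem.Set.mem_ofList]
      exact hE
    rw [if_neg hc']
    rw [PySem.Dict.getD_insert_self]
    rw [if_neg (by simp [PySem.Dict.contains_empty] :
      ¬ ((PySem.Dict.empty : PySem.Dict String Int).contains t = true))]
    rw [PySem.Dict.getD_insert_self]
    rw [PySem.Dict.insert_insert_self]
    have hemp : (PySem.Dict.empty : PySem.Dict String Int).insert t ((0 : Int) + 1)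
        = PySem.Dict.mk [(t, (0 : Int) + 1)] := by
      apply PySem.Dict.ext
      rw [PySem.Dict.items_insert_of_not_contains _ _ (PySem.Dict.contains_empty t)]
      rfl
    rw [PySem.Dict.insert_insert_self, hemp]
    have hnotF : e ∉ (PySem.Set.ofList (P.map (·.1))).map (fun a => a) := by
      simpa [List.map_id', PySem.Set.mem_ofList] using hE
    have houter : (pvC P).insert e (PySem.Dict.mk [(t, (0 : Int) + 1)])
        = PySem.Dict.mk ((PySem.Set.ofList (P.map (·.1))).map (fun e' => (e', pvInner P e'))
            ++ [(e, PySem.Dict.mk [(t, (0 : Int) + 1)])]) := by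
      unfold pvC
      exact pvMk_insert_of_not_mem _ (fun a => a) (fun e' => pvInner P e') hnotF _
    rw [houter]
    unfold pvC
    apply PySem.Dict.ext
    simp only
    have hkeysF : PySem.Set.ofList ((P ++ [(e, t)]).map (·.1))
        = PySem.Set.ofList (P.map (·.1)) ++ [e] := by
      rw [List.map_append, List.map_cons, List.map_nil, pv_ofList_concat]
      simp [PySem.Set.add, PySem.Set.mem_ofList, hE]
    rw [hkeysF, List.map_append]
    have hpP : ((e, t) : String × String) ∉ P := by
      intro hh; exact hE (List.mem_map.mpr ⟨(e, t), hh, rfl⟩)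
    have hS : PySem.Set.ofList (P ++ [(e, t)]) = PySem.Set.ofList P ++ [(e, t)] := by
      rw [pv_ofList_concat]
      simp [PySem.Set.add, PySem.Set.mem_ofList, hpP]
    congr 1
    · apply List.map_congr_left
      intro e' he'
      have h' : e' ≠ e := by
        intro hh; subst hh
        exact hE ((PySem.Set.mem_ofList _ _).mp he')
      congr 1
      unfold pvInner
      apply PySem.Dict.ext
      simp only
      rw [hS, List.filter_append]
      have hone : ([((e, t))] : List (String × String)).filter (fun q => q.1 == e') = [] := by
        simp [Ne.symm h']
      rw [hone, List.append_nil]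
      apply List.map_congr_left
      intro q hq
      rcases List.mem_filter.mp hq with ⟨hqS, hq1⟩
      have hq1' : q.1 = e' := beq_iff_eq.mp hq1
      have hqp : ¬ ((e, t) = q) := by
        intro hh; rw [← hh] at hq1'; exact h' hq1'.symm
      rw [hcount]
      simp [hqp]
    · simp only [List.map_cons, List.map_nil]
      have hfiltnil : (PySem.Set.ofList P).filter (fun q => q.1 == e) = [] := by
        rw [List.filter_eq_nil_iff]
        intro q hq hqe
        have hq' : q ∈ P := (PySem.Set.mem_ofList _ _).mp hq
        exact hE (List.mem_map.mpr ⟨q, hq', beq_iff_eq.mp hqe⟩)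
      have hinner : pvInner (P ++ [(e, t)]) e = PySem.Dict.mk [(t, (0 : Int) + 1)] := by
        unfold pvInner
        apply PySem.Dict.ext
        simp only
        rw [hS, List.filter_append, hfiltnil, List.nil_append]
        simp [List.count_eq_zero.mpr hpP]
      rw [hinner]

lemma pv_foldA_eq (P : List (String × String)) :
    P.foldl (fun d p => pvStepA d p.1 p.2) PySem.Dict.empty = pvC P := by
  induction P using List.reverseRecOn with
  | nil => rfl
  | append_singleton P p ih =>
    rw [List.foldl_append]
    simp only [List.foldl_cons, List.foldl_nil, ih]
    exact pv_stepA_C P p.1 p.2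

-- B-side: ordered dedup commutes with filter
lemma pv_ofList_filter {α : Type} [BEq α] [LawfulBEq α] (l : List α) (p : α → Bool) :
    PySem.Set.ofList (l.filter p) = (PySem.Set.ofList l).filter p := by
  induction l using List.reverseRecOn with
  | nil => rfl
  | append_singleton l x ih =>
    rw [List.filter_append, pv_ofList_concat, List.filter_singleton]
    by_cases hp : p x = true
    · rw [hp, cond_true, pv_ofList_concat, ih]
      by_cases hx : x ∈ l
      · have h1 : (PySem.Set.ofList l).add x = PySem.Set.ofList l := by
          simp [PySem.Set.add, PySem.Set.mem_ofList, hx]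
        have h2 : PySem.Set.add ((PySem.Set.ofList l).filter p) x = (PySem.Set.ofList l).filter p := by
          simp [PySem.Set.add, List.mem_filter, PySem.Set.mem_ofList, hx, hp]
        rw [h1, h2]
      · have h1 : (PySem.Set.ofList l).add x = PySem.Set.ofList l ++ [x] := by
          simp [PySem.Set.add, PySem.Set.mem_ofList, hx]
        have h2 : PySem.Set.add ((PySem.Set.ofList l).filter p) x
            = (PySem.Set.ofList l).filter p ++ [x] := by
          simp [PySem.Set.add, List.mem_filter, PySem.Set.mem_ofList, hx]
        rw [h1, h2, List.filter_append, List.filter_singleton, hp, cond_true]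
    · have hp' : p x = false := by simpa using hp
      rw [hp', cond_false, List.append_nil, ih]
      by_cases hx : x ∈ l
      · have h1 : (PySem.Set.ofList l).add x = PySem.Set.ofList l := by
          simp [PySem.Set.add, PySem.Set.mem_ofList, hx]
        rw [h1]
      · have h1 : (PySem.Set.ofList l).add x = PySem.Set.ofList l ++ [x] := by
          simp [PySem.Set.add, PySem.Set.mem_ofList, hx]
        rw [h1, List.filter_append, List.filter_singleton, hp', cond_false, List.append_nil]

-- B-side: ordered dedup commutes with an injective-on-the-list map
lemma pv_ofList_map_injOn {α β : Type} [BEq α] [LawfulBEq α] [BEq β] [LawfulBEq β]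
    (l : List α) (f : α → β) (hinj : ∀ x ∈ l, ∀ y ∈ l, f x = f y → x = y) :
    PySem.Set.ofList (l.map f) = (PySem.Set.ofList l).map f := by
  induction l using List.reverseRecOn with
  | nil => rfl
  | append_singleton l x ih =>
    have hinj' : ∀ a ∈ l, ∀ b ∈ l, f a = f b → a = b := fun a ha b hb =>
      hinj a (List.mem_append_left _ ha) b (List.mem_append_left _ hb)
    rw [List.map_append, List.map_singleton, pv_ofList_concat, pv_ofList_concat, ih hinj']
    by_cases hx : x ∈ l
    · have h1 : (PySem.Set.ofList l).add x = PySem.Set.ofList l := by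
        simp [PySem.Set.add, PySem.Set.mem_ofList, hx]
      have h2 : PySem.Set.add ((PySem.Set.ofList l).map f) (f x) = (PySem.Set.ofList l).map f := by
        have : f x ∈ (PySem.Set.ofList l).map f :=
          List.mem_map_of_mem ((PySem.Set.mem_ofList _ _).mpr hx)
        simp [PySem.Set.add, this]
      rw [h1, h2]
    · have h1 : (PySem.Set.ofList l).add x = PySem.Set.ofList l ++ [x] := by
        simp [PySem.Set.add, PySem.Set.mem_ofList, hx]
      have h2 : PySem.Set.add ((PySem.Set.ofList l).map f) (f x)
          = (PySem.Set.ofList l).map f ++ [f x] := by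
        have hfx : f x ∉ (PySem.Set.ofList l).map f := by
          intro hmem
          rcases List.mem_map.mp hmem with ⟨y, hy, hfy⟩
          have hyl : y ∈ l := (PySem.Set.mem_ofList _ _).mp hy
          have : y = x := hinj y (List.mem_append_left _ hyl) x
            (List.mem_append_right _ (List.mem_singleton_self x)) hfy
          exact hx (this ▸ hyl)
        simp [PySem.Set.add, hfx]
      rw [h1, h2, List.map_append, List.map_singleton]

-- B-side: the group-by-count inner list equals the canonical inner items
lemma pv_innerB (P : List (String × String)) (e : String) :
    (PySem.Set.ofList ((P.filter (fun q => q.1 == e)).map (fun q => q.2))).map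
      (fun t => (t, (P.count (e, t) : Int)))
    = ((PySem.Set.ofList P).filter (fun q => q.1 == e)).map
      (fun q => (q.2, (P.count q : Int))) := by
  have hinj : ∀ x ∈ P.filter (fun q => q.1 == e), ∀ y ∈ P.filter (fun q => q.1 == e),
      x.2 = y.2 → x = y := by
    intro x hx y hy h2
    have hx1 := beq_iff_eq.mp (List.mem_filter.mp hx).2
    have hy1 := beq_iff_eq.mp (List.mem_filter.mp hy).2
    cases x; cases y; simp_all
  rw [pv_ofList_map_injOn _ _ hinj, pv_ofList_filter, List.map_map]
  apply List.map_congr_left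
  intro q hq
  obtain ⟨a, b⟩ := q
  have h1 : a = e := beq_iff_eq.mp (List.mem_filter.mp hq).2
  subst h1
  rfl

-- port bundles
lemma pv_portA (L : List (String × String)) :
    train_distortion_table L
      = (pvC (L.flatMap pvPairsOf)).items.map (fun q => (q.1, q.2.items)) := by
  unfold train_distortion_table
  have h : (L.foldl (fun d s =>
      let ew := PySem.Str.split₀ s.1
      let tw := PySem.Str.split₀ s.2
      (PySem.List.pyRange 0 ew.length 1).foldl (fun d i =>
        match PySem.List.pyGet? ew i, PySem.List.pyGet? tw i with
        | some e, some t => pvStepA d e t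
        | _, _ => d) d) PySem.Dict.empty)
      = (L.flatMap pvPairsOf).foldl (fun d p => pvStepA d p.1 p.2) PySem.Dict.empty := by
    rw [List.foldl_flatMap]
    congr 1
    funext d s
    exact pv_foldl_pairsA _ _ _ _ _
  rw [h, pv_foldA_eq]

lemma pv_pairsB (L : List (String × String)) :
    (L.foldl (fun acc s =>
      let ew := PySem.Str.split₀ s.1
      let tw := PySem.Str.split₀ s.2
      (PySem.List.pyRange 0 ew.length 1).foldl (fun acc i =>
        match PySem.List.pyGet? ew i with
        | none => acc
        | some e =>
          match PySem.List.pyGet? tw i with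
          | none => acc
          | some t => acc ++ [(e, t)]) acc) ([] : List (String × String)))
    = L.flatMap pvPairsOf := by
  have h : ∀ (a : List (String × String)), ∀ s ∈ L,
      (PySem.List.pyRange 0 (PySem.Str.split₀ s.1).length 1).foldl (fun acc i =>
        match PySem.List.pyGet? (PySem.Str.split₀ s.1) i with
        | none => acc
        | some e =>
          match PySem.List.pyGet? (PySem.Str.split₀ s.2) i with
          | none => acc
          | some t => acc ++ [(e, t)]) a = a ++ pvPairsOf s := by
    intro a s _
    have hfn : ∀ (acc : List (String × String)), ∀ i ∈
        PySem.List.pyRange 0 (PySem.Str.split₀ s.1).length 1,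
        (match PySem.List.pyGet? (PySem.Str.split₀ s.1) i with
         | none => acc
         | some e =>
           match PySem.List.pyGet? (PySem.Str.split₀ s.2) i with
           | none => acc
           | some t => acc ++ [(e, t)])
        = (match PySem.List.pyGet? (PySem.Str.split₀ s.1) i,
                 PySem.List.pyGet? (PySem.Str.split₀ s.2) i with
           | some e, some t => acc ++ [(e, t)]
           | _, _ => acc) := by
      intro acc i _
      cases PySem.List.pyGet? (PySem.Str.split₀ s.1) i <;>
        cases PySem.List.pyGet? (PySem.Str.split₀ s.2) i <;> rfl
    rw [PySem.List.foldl_congr_mem _ _ _ a hfn]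
    rw [pv_foldl_pairsA (PySem.Str.split₀ s.1) (PySem.Str.split₀ s.2)
      (fun (a : List (String × String)) e t => a ++ [(e, t)])]
    simp only [Prod.mk.eta]
    exact PySem.List.foldl_append_singleton _ _
  rw [PySem.List.foldl_congr_mem L _ (fun a s => a ++ pvPairsOf s) [] h,
    PySem.List.foldl_append_eq_flatMap, List.nil_append]

lemma pv_portB (L : List (String × String)) :
    train_distortion_table_alt L
      = (pvC (L.flatMap pvPairsOf)).items.map (fun q => (q.1, q.2.items)) := by
  unfold train_distortion_table_alt
  rw [pv_pairsB L]
  generalize L.flatMap pvPairsOf = P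
  simp only [PySem.List.dedup_eq_ofList]
  show _ = ((PySem.Set.ofList (P.map (fun x => x.1))).map
      (fun e => (e, pvInner P e))).map (fun q => (q.1, q.2.items))
  rw [List.map_map]
  apply List.map_congr_left
  intro e _
  show (e, _) = (e, (pvInner P e).items)
  exact congrArg _ (pv_innerB P e)

-- ===== VERDICT (by name: the statement is the Claim_ definition above) =====
theorem train_distortion_table_spec : Claim_equal_train_distortion_table := by
  intro aligned_sentences _ _
  unfold Spec_train_distortion_table
  rw [pv_portA, pv_portB]
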